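-- pv_equiv track=rewrite | github.com/OmK-MilTechLink/ETL_pipeline | src/schema_to_chunks.py | resolve_internal_references
-- ===== SOURCE A (Python) =====
-- from typing import List, Dict, Set
--
-- def resolve_internal_references(
--     raw_refs: Set[str],
--     known_chunk_ids: Set[str],
--     document_id: str
-- ) -> List[str]:
--     """
--     Resolve internal references ONLY if exact chunk ID exists.
--     """
--     resolved = set()
--
--     for ref in raw_refs:
--         ref_id = ref.split()[-1]  # handles "Clause 6.1" → "6.1"
--         if ref_id in known_chunk_ids:
--             resolved.add(f"{document_id}::{ref_id}")
--
--     return sorted(resolved)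
-- ===== SOURCE B (Python) =====
-- def resolve_internal_references(raw_refs, known_chunk_ids, document_id):
--     # Sort the deduplicated extracted ids and the known ids, then advance two
--     # pointers through both sorted lists; matches are emitted already formatted
--     # and already in sorted order, so no final sort over the result is needed.
--     ids = sorted({ref.split()[-1] for ref in raw_refs})
--     known = sorted(set(known_chunk_ids))
--     out = []
--     i = j = 0
--     while i < len(ids) and j < len(known):
--         if ids[i] < known[j]:
--             i += 1
--         elif known[j] < ids[i]:
--             j += 1
--         else:
--             out.append(f"{document_id}::{ids[i]}")
--             i += 1
--             j += 1
--     return out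
-- ===== Notes on version B (the rewrite author's own statement) =====
-- stated objective: alternative
-- what changed: A filters refs one by one through a membership test and sorts the formatted results at the end; B instead sorts the deduplicated extracted ids and the known ids up front and runs a two-pointer merge intersection over the two sorted lists, emitting the formatted matches directly in output order with no membership test and no final sort.
import Mathlib
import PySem

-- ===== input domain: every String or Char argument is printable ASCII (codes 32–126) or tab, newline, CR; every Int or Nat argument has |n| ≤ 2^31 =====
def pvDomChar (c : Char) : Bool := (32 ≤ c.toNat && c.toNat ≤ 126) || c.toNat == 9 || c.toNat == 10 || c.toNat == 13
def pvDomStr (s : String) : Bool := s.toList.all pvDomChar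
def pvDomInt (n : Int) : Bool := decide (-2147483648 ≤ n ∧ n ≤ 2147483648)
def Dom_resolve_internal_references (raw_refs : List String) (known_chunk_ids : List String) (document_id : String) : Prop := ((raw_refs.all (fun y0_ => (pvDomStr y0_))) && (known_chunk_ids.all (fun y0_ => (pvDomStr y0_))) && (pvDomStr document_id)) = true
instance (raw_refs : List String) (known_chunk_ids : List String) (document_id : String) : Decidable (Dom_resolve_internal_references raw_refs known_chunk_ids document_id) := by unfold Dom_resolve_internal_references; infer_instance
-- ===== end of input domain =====

-- B replaces A's filter-then-sort loop by a sort-both-id-lists + two-pointer merge intersection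
-- that emits the formatted matches already in output order (no membership test, no final sort).

-- ===== PORT A =====
-- A: for each ref, take split()[-1]; if it is a known chunk id, add the formatted string to a set; return sorted(set).
-- split()[-1] is total here under Pre_ (every ref has a nonempty split); pyGetD's default is never used.
def resolve_internal_references (raw_refs : List String) (known_chunk_ids : List String) (document_id : String) : List String :=
  let resolved : PySem.Set String :=
    raw_refs.foldl (fun resolved ref =>
      let ref_id := PySem.List.pyGetD (PySem.Str.split₀ ref) (-1) ""
      if known_chunk_ids.contains ref_id then
        PySem.Set.add resolved (document_id ++ "::" ++ ref_id)
      else resolved) PySem.Set.empty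
  PySem.List.sorted resolved (fun x => x) false

-- ===== PORT B =====
-- the two-pointer while loop of Source B, as recursion over the two sorted lists
def pvMergeFmt (document_id : String) : List String → List String → List String
  | [], _ => []
  | _ :: _, [] => []
  | a :: as, b :: bs =>
    if a < b then pvMergeFmt document_id as (b :: bs)
    else if b < a then pvMergeFmt document_id (a :: as) bs
    else (document_id ++ "::" ++ a) :: pvMergeFmt document_id as bs
termination_by xs ys => xs.length + ys.length

-- B: sort the deduplicated extracted ids and the known ids, then merge-intersect, formatting on emit.
def resolve_internal_references_alt (raw_refs : List String) (known_chunk_ids : List String) (document_id : String) : List String :=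
  let ids := PySem.List.sorted
    (PySem.Set.ofList (raw_refs.map (fun ref => PySem.List.pyGetD (PySem.Str.split₀ ref) (-1) "")))
    (fun x => x) false
  let known := PySem.List.sorted (PySem.Set.ofList known_chunk_ids) (fun x => x) false
  pvMergeFmt document_id ids known

-- ===== PRECONDITION & SPEC =====
-- Pre_ excludes exactly the inputs where some reference is empty or all whitespace: there ref.split()[-1]
-- raises IndexError in A (and in B's comprehension alike).
def Pre_resolve_internal_references (raw_refs : List String) (known_chunk_ids : List String) (document_id : String) : Prop :=
  ∀ ref ∈ raw_refs, PySem.Str.split₀ ref ≠ []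
instance (raw_refs : List String) (known_chunk_ids : List String) (document_id : String) : Decidable (Pre_resolve_internal_references raw_refs known_chunk_ids document_id) := by unfold Pre_resolve_internal_references; infer_instance

def pvWitness_resolve_internal_references : List String × List String × String :=
  (["Clause 6.1", "Section 2"], ["6.1", "3"], "doc")

def Spec_resolve_internal_references (raw_refs : List String) (known_chunk_ids : List String) (document_id : String) (out : List String) : Prop := out = resolve_internal_references_alt raw_refs known_chunk_ids document_id
instance (raw_refs : List String) (known_chunk_ids : List String) (document_id : String) (out : List String) : Decidable (Spec_resolve_internal_references raw_refs known_chunk_ids document_id out) := by unfold Spec_resolve_internal_references; infer_instance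

-- ===== CLAIM =====
def Claim_equal_resolve_internal_references : Prop := ∀ (raw_refs : List String) (known_chunk_ids : List String) (document_id : String), Dom_resolve_internal_references raw_refs known_chunk_ids document_id → Pre_resolve_internal_references raw_refs known_chunk_ids document_id → Spec_resolve_internal_references raw_refs known_chunk_ids document_id (resolve_internal_references raw_refs known_chunk_ids document_id)

-- ===== LEMMAS AND PROOFS =====

-- the formatting prefix is strictly monotone for string order
theorem fmt_lt (d : String) {a b : String} (h : a < b) : d ++ "::" ++ a < d ++ "::" ++ b := by
  simp only [String.lt_iff_toList_lt, String.toList_append] at h ⊢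
  exact List.append_left_lt h

-- membership in the merge of two strictly increasing lists is membership in both, formatted
theorem mem_pvMergeFmt (d : String) (xs ys : List String)
    (hx : xs.Pairwise (· < ·)) (hy : ys.Pairwise (· < ·)) (z : String) :
    z ∈ pvMergeFmt d xs ys ↔ ∃ r, r ∈ xs ∧ r ∈ ys ∧ z = d ++ "::" ++ r := by
  fun_induction pvMergeFmt d xs ys with
  | case1 ys => simp
  | case2 a as => simp
  | case3 a as b bs hab ih =>
    rw [ih hx.of_cons hy]
    constructor
    · rintro ⟨r, hr, hrb, rfl⟩
      exact ⟨r, List.mem_cons_of_mem _ hr, hrb, rfl⟩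
    · rintro ⟨r, hra, hrb, rfl⟩
      rcases List.mem_cons.mp hra with rfl | hr
      · exfalso
        rcases List.mem_cons.mp hrb with rfl | hr'
        · exact lt_irrefl r hab
        · exact lt_irrefl r (lt_trans hab (List.rel_of_pairwise_cons hy hr'))
      · exact ⟨r, hr, hrb, rfl⟩
  | case4 a as b bs hab hba ih =>
    rw [ih hx hy.of_cons]
    constructor
    · rintro ⟨r, hra, hrb, rfl⟩
      exact ⟨r, hra, List.mem_cons_of_mem _ hrb, rfl⟩
    · rintro ⟨r, hra, hrb, rfl⟩
      rcases List.mem_cons.mp hrb with rfl | hr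
      · exfalso
        rcases List.mem_cons.mp hra with rfl | hr'
        · exact lt_irrefl r hba
        · exact lt_irrefl r (lt_trans hba (List.rel_of_pairwise_cons hx hr'))
      · exact ⟨r, hra, hr, rfl⟩
  | case5 a as b bs hab hba ih =>
    have heq : a = b := le_antisymm (not_lt.mp hba) (not_lt.mp hab)
    subst heq
    rw [List.mem_cons, ih hx.of_cons hy.of_cons]
    constructor
    · rintro (rfl | ⟨r, hra, hrb, rfl⟩)
      · exact ⟨a, List.mem_cons_self, List.mem_cons_self, rfl⟩
      · exact ⟨r, List.mem_cons_of_mem _ hra, List.mem_cons_of_mem _ hrb, rfl⟩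
    · rintro ⟨r, hra, hrb, rfl⟩
      rcases List.mem_cons.mp hra with rfl | hr
      · exact Or.inl rfl
      · rcases List.mem_cons.mp hrb with rfl | hr'
        · exact absurd (List.rel_of_pairwise_cons hx hr) (lt_irrefl r)
        · exact Or.inr ⟨r, hr, hr', rfl⟩

-- the merge of two strictly increasing lists is strictly increasing
theorem pairwise_pvMergeFmt (d : String) (xs ys : List String)
    (hx : xs.Pairwise (· < ·)) (hy : ys.Pairwise (· < ·)) :
    (pvMergeFmt d xs ys).Pairwise (· < ·) := by
  fun_induction pvMergeFmt d xs ys with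
  | case1 ys => simp
  | case2 a as => simp
  | case3 a as b bs hab ih => exact ih hx.of_cons hy
  | case4 a as b bs hab hba ih => exact ih hx hy.of_cons
  | case5 a as b bs hab hba ih =>
    have heq : a = b := le_antisymm (not_lt.mp hba) (not_lt.mp hab)
    subst heq
    refine List.pairwise_cons.mpr ⟨?_, ih hx.of_cons hy.of_cons⟩
    intro z hz
    obtain ⟨r, hra, _, rfl⟩ := (mem_pvMergeFmt d as bs hx.of_cons hy.of_cons z).mp hz
    exact fmt_lt d (List.rel_of_pairwise_cons hx hra)

-- membership in A's conditional-add fold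
theorem mem_foldl_add_if {l : List String} {s : PySem.Set String}
    (cond : String → Bool) (f : String → String) (y : String) :
    y ∈ l.foldl (fun s ref => if cond ref then PySem.Set.add s (f ref) else s) s ↔
      y ∈ s ∨ ∃ ref ∈ l, cond ref = true ∧ y = f ref := by
  induction l generalizing s with
  | nil => simp
  | cons x xs ih =>
    by_cases hc : cond x = true <;>
      simp only [List.foldl_cons, hc, if_true, Bool.false_eq_true, if_false, ih,
        PySem.Set.mem_add, List.mem_cons] <;> aesop

theorem resolve_internal_references_spec : Claim_equal_resolve_internal_references := by
  intro raw_refs known_chunk_ids document_id _ _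
  unfold Spec_resolve_internal_references resolve_internal_references resolve_internal_references_alt
  have hx := PySem.List.sorted_ofList_pairwise_lt
    (xs := raw_refs.map (fun ref => PySem.List.pyGetD (PySem.Str.split₀ ref) (-1) ""))
  have hy := PySem.List.sorted_ofList_pairwise_lt (xs := known_chunk_ids)
  apply PySem.List.sorted_eq_of_perm_of_pairwise_lt
  · -- the merge result is a permutation of A's accumulated set
    apply (List.perm_ext_iff_of_nodup
      (List.Pairwise.nodup (pairwise_pvMergeFmt _ _ _ hx hy)) ?_).mpr
    · intro y
      rw [mem_pvMergeFmt _ _ _ hx hy,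
        mem_foldl_add_if (fun ref => known_chunk_ids.contains
            (PySem.List.pyGetD (PySem.Str.split₀ ref) (-1) ""))
          (fun ref => document_id ++ "::" ++ PySem.List.pyGetD (PySem.Str.split₀ ref) (-1) "")]
      simp only [PySem.List.mem_sorted, PySem.Set.mem_ofList, List.mem_map, PySem.Set.empty,
        List.not_mem_nil, false_or, List.contains_eq_mem, decide_eq_true_eq]
      constructor
      · rintro ⟨r, ⟨ref, href, rfl⟩, hk, rfl⟩
        exact ⟨ref, href, hk, rfl⟩
      · rintro ⟨ref, href, hk, rfl⟩
        exact ⟨_, ⟨ref, href, rfl⟩, hk, rfl⟩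
    · -- A's conditional-add fold keeps the accumulator duplicate-free
      have : ∀ (l : List String) (s : PySem.Set String), s.Nodup →
          (l.foldl (fun s ref =>
            if known_chunk_ids.contains (PySem.List.pyGetD (PySem.Str.split₀ ref) (-1) "") then
              PySem.Set.add s (document_id ++ "::" ++ PySem.List.pyGetD (PySem.Str.split₀ ref) (-1) "")
            else s) s).Nodup := by
        intro l
        induction l with
        | nil => exact fun s hs => hs
        | cons x xs ih =>
          intro s hs
          simp only [List.foldl_cons]
          split
          · exact ih _ (PySem.Set.nodup_add _ _ hs)
          · exact ih _ hs
      exact this raw_refs PySem.Set.empty List.nodup_nil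
  · exact pairwise_pvMergeFmt _ _ _ hx hy
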